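-- pv_equiv track=rewrite | github.com/GreenFuze/spade | snapshot.py | _build_priority_samples
-- ===== SOURCE A (Python) =====
-- from typing import List, Tuple
--
-- def _build_priority_samples(names: List[str], markers: List[str], max_count: int) -> List[str]:
--     """
--     Build sample list with marker priority, then alphabetical fill.
--
--     Args:
--         names: List of all names (files or directories)
--         markers: List of marker names
--         max_count: Maximum number of samples to include
--
--     Returns:
--         List of sample names with marker priority
--     """
--     if max_count == 0:
--         return []
--
--     # Extract marker names that are exact matches in the names list
--     marker_matches = []
--     for marker in markers:
--         # For path patterns containing '/', extract the basename
--         if '/' in marker: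
--             basename = marker.split('/')[-1]
--             if basename in names:
--                 marker_matches.append(basename)
--         else:
--             # Direct name match
--             if marker in names:
--                 marker_matches.append(marker)
--
--     # Remove duplicates and sort
--     marker_matches = sorted(list(set(marker_matches)))
--
--     # Get remaining names (excluding marker matches)
--     remaining_names = sorted([name for name in names if name not in marker_matches])
--
--     # Build result: markers first, then remaining names
--     result = marker_matches + remaining_names
--
--     # Apply cap
--     return result[:max_count]
-- ===== SOURCE B (Python) =====
-- from typing import List
--
-- def _build_priority_samples(names: List[str], markers: List[str], max_count: int) -> List[str]:
--     # Single sort of names + one partition pass, instead of A's per-marker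
--     # linear scans of names plus a second sort of the remainder.
--     marker_set = {m.split('/')[-1] if '/' in m else m for m in markers}
--     mm = []    # sorted, deduped marker matches
--     rest = []  # sorted remaining names (duplicates kept)
--     for n in sorted(names):
--         if n in marker_set:
--             if not mm or mm[-1] != n:
--                 mm.append(n)
--         else:
--             rest.append(n)
--     return (mm + rest)[:max_count]
-- ===== Notes on version B (the rewrite author's own statement) =====
-- stated objective: faster
-- what changed: B sorts names once and partitions that single sorted list in one pass (deduping marker matches by adjacency) against a precomputed basename set, instead of A's per-marker linear membership scans of names, set+sort of matches, and a second sort of the remainder.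
import Mathlib
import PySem

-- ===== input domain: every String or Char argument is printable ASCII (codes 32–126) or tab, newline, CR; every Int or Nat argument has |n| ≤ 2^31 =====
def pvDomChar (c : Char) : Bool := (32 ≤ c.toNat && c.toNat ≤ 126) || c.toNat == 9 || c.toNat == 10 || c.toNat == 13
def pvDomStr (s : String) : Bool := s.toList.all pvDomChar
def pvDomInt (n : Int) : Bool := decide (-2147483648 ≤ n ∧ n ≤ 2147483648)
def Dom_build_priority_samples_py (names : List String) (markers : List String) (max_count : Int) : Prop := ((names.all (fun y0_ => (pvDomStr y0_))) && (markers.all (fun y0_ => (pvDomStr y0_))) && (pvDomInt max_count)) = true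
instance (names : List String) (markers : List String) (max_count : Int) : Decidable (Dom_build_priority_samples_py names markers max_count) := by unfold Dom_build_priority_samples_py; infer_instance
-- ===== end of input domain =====

-- B sorts names once and partitions that single sorted pass (deduping marker matches by adjacency)
-- against a precomputed basename set, instead of A's per-marker linear scans of names plus a second sort.


-- ===== PORT A =====
def build_priority_samples_py (names : List String) (markers : List String) (max_count : Int) : List String :=
  if max_count = 0 then []
  else
    -- for marker in markers: collect exact matches (basename for path patterns)
    let marker_matches : List String := markers.foldl (fun acc marker =>
      if PySem.Str.isIn "/" marker then
        let basename := PySem.List.pyGetD ((PySem.Str.split? marker "/").getD []) (-1) ""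
        if names.contains basename then acc ++ [basename] else acc
      else
        if names.contains marker then acc ++ [marker] else acc) []
    -- marker_matches = sorted(list(set(marker_matches)))
    let marker_matches := PySem.List.sorted (PySem.Set.ofList marker_matches) (fun x => x)
    -- remaining_names = sorted([name for name in names if name not in marker_matches])
    let remaining_names := PySem.List.sorted (names.filter (fun name => !(marker_matches.contains name))) (fun x => x)
    -- return (marker_matches + remaining_names)[:max_count]
    PySem.List.slice (marker_matches ++ remaining_names) none (some max_count)

-- ===== PORT B =====
-- marker_set = {m.split('/')[-1] if '/' in m else m for m in markers}
def pvBasename (m : String) : String :=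
  if PySem.Str.isIn "/" m then PySem.List.pyGetD ((PySem.Str.split? m "/").getD []) (-1) "" else m

def build_priority_samples_py_alt (names : List String) (markers : List String) (max_count : Int) : List String :=
  let marker_set : PySem.Set String := PySem.Set.ofList (markers.map pvBasename)
  -- one pass over sorted(names): dedup marker matches by adjacency, keep the rest in order
  let p := (PySem.List.sorted names (fun x => x)).foldl
    (fun (p : List String × List String) n =>
      if marker_set.contains n then
        if p.1 = [] ∨ PySem.List.pyGetD p.1 (-1) "" ≠ n then (p.1 ++ [n], p.2) else p
      else (p.1, p.2 ++ [n])) ([], [])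
  PySem.List.slice (p.1 ++ p.2) none (some max_count)

-- ===== PRECONDITION & SPEC =====
def Spec_build_priority_samples_py (names : List String) (markers : List String) (max_count : Int) (out : List String) : Prop := out = build_priority_samples_py_alt names markers max_count
instance (names : List String) (markers : List String) (max_count : Int) (out : List String) : Decidable (Spec_build_priority_samples_py names markers max_count out) := by unfold Spec_build_priority_samples_py; infer_instance

-- ===== CLAIM (what is proved, stated in full; the proofs are below) =====
def Claim_equal_build_priority_samples_py : Prop := ∀ (names : List String) (markers : List String) (max_count : Int), Dom_build_priority_samples_py names markers max_count → Spec_build_priority_samples_py names markers max_count (build_priority_samples_py names markers max_count)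

-- ===== LEMMAS AND PROOFS =====

-- the dedup-by-adjacency skeleton of B's loop, with the running last appended marker match
def pvDed (memS : String → Bool) : Option String → List String → List String
  | _, [] => []
  | last?, n :: t =>
      if memS n then
        if last? = some n then pvDed memS last? t else n :: pvDed memS (some n) t
      else pvDed memS last? t

-- B's loop state evolves as (mm ++ pvDed …, rest ++ filter …)
theorem pvLoop_eq (memS : String → Bool) (l : List String) (mm rest : List String) :
    l.foldl (fun (p : List String × List String) n =>
      if memS n then
        if p.1 = [] ∨ PySem.List.pyGetD p.1 (-1) "" ≠ n then (p.1 ++ [n], p.2) else p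
      else (p.1, p.2 ++ [n])) (mm, rest)
    = (mm ++ pvDed memS mm.getLast? l, rest ++ l.filter (fun n => !memS n)) := by
  induction l generalizing mm rest with
  | nil => simp [pvDed]
  | cons n t ih =>
    simp only [List.foldl_cons]
    by_cases hs : memS n
    · by_cases hl : mm.getLast? = some n
      · have hmm : ¬ (mm = [] ∨ PySem.List.pyGetD mm (-1) "" ≠ n) := by
          rcases mm.eq_nil_or_concat with h | ⟨ys, y, rfl⟩
          · subst h; simp at hl
          · simp only [List.concat_eq_append] at hl ⊢
            push Not
            rw [List.getLast?_concat] at hl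
            refine ⟨by simp, ?_⟩
            rw [PySem.List.pyGetD_neg_one_append_singleton]
            exact Option.some_injective _ hl
        rw [show ((if memS n = true then
              if mm = [] ∨ PySem.List.pyGetD mm (-1) "" ≠ n then (mm ++ [n], rest) else (mm, rest)
            else (mm, rest ++ [n])) : List String × List String) = (mm, rest) by
          rw [if_pos hs, if_neg hmm]]
        rw [ih]
        simp [pvDed, hs, hl]
      · have hmm : mm = [] ∨ PySem.List.pyGetD mm (-1) "" ≠ n := by
          rcases mm.eq_nil_or_concat with h | ⟨ys, y, rfl⟩
          · exact Or.inl h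
          · right
            simp only [List.concat_eq_append] at hl ⊢
            rw [PySem.List.pyGetD_neg_one_append_singleton]
            intro he; exact hl (by rw [List.getLast?_concat, he])
        rw [show ((if memS n = true then
              if mm = [] ∨ PySem.List.pyGetD mm (-1) "" ≠ n then (mm ++ [n], rest) else (mm, rest)
            else (mm, rest ++ [n])) : List String × List String) = (mm ++ [n], rest) by
          rw [if_pos hs, if_pos hmm]]
        rw [ih]
        simp [pvDed, hs, hl]
    · rw [show ((if memS n = true then
            if mm = [] ∨ PySem.List.pyGetD mm (-1) "" ≠ n then (mm ++ [n], rest) else (mm, rest)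
          else (mm, rest ++ [n])) : List String × List String) = (mm, rest ++ [n]) by
        rw [if_neg hs]]
      rw [ih]
      simp [pvDed, hs]

-- on a ≤-sorted list whose elements all dominate the last marker, pvDed is strictly increasing
-- and contains exactly the marker elements other than last?
theorem pvDed_spec (memS : String → Bool) (l : List String) (last? : Option String)
    (hsort : l.Pairwise (· ≤ ·)) (hlast : ∀ y ∈ l, ∀ a, last? = some a → a ≤ y) :
    (pvDed memS last? l).Pairwise (· < ·) ∧
      (∀ x, x ∈ pvDed memS last? l ↔ x ∈ l ∧ memS x = true ∧ some x ≠ last?) := by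
  induction l generalizing last? with
  | nil => simp [pvDed]
  | cons n t ih =>
    have hsn : ∀ y ∈ t, n ≤ y := fun y hy => (List.pairwise_cons.mp hsort).1 y hy
    have hst : t.Pairwise (· ≤ ·) := (List.pairwise_cons.mp hsort).2
    by_cases hs : memS n
    · by_cases hl : last? = some n
      · have hred : pvDed memS last? (n :: t) = pvDed memS last? t := by
          simp [pvDed, hs, hl]
        have ht := ih (last? := last?) hst (fun y hy a ha => by
          rw [hl] at ha; cases Option.some_injective _ ha.symm; exact hsn y hy)
        rw [hred]
        refine ⟨ht.1, fun x => ?_⟩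
        rw [ht.2]
        constructor
        · rintro ⟨hx, hm, hne⟩; exact ⟨List.mem_cons_of_mem _ hx, hm, hne⟩
        · rintro ⟨hx, hm, hne⟩
          rcases List.mem_cons.mp hx with rfl | hx
          · exact absurd hl.symm hne
          · exact ⟨hx, hm, hne⟩
      · have hred : pvDed memS last? (n :: t) = n :: pvDed memS (some n) t := by
          simp [pvDed, hs, hl]
        have ht := ih (last? := some n) hst (fun y hy a ha => by
          cases Option.some_injective _ ha.symm; exact hsn y hy)
        rw [hred]
        constructor
        · refine List.pairwise_cons.mpr ⟨fun y hy => ?_, ht.1⟩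
          rcases (ht.2 y).mp hy with ⟨hyt, _, hyne⟩
          exact lt_of_le_of_ne (hsn y hyt) (fun h => hyne (by rw [h]))
        · intro x
          rw [List.mem_cons, ht.2]
          constructor
          · rintro (rfl | ⟨hx, hm, hm_ne⟩)
            · exact ⟨List.mem_cons_self, hs, fun h => hl h.symm⟩
            · refine ⟨List.mem_cons_of_mem _ hx, hm, ?_⟩
              intro h
              have hxn : x ≤ n := hlast n List.mem_cons_self x h.symm
              exact hm_ne (congrArg some (le_antisymm hxn (hsn x hx)))
          · rintro ⟨hx, hm, hne⟩
            rcases List.mem_cons.mp hx with rfl | hx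
            · exact Or.inl rfl
            · by_cases hxn : x = n
              · exact Or.inl hxn
              · exact Or.inr ⟨hx, hm, fun h => hxn (Option.some_injective _ h)⟩
    · have hred : pvDed memS last? (n :: t) = pvDed memS last? t := by
        simp [pvDed, hs]
      have ht := ih (last? := last?) hst (fun y hy a ha =>
        le_trans (hlast n List.mem_cons_self a ha) (hsn y hy))
      rw [hred]
      refine ⟨ht.1, fun x => ?_⟩
      rw [ht.2]
      constructor
      · rintro ⟨hx, hm, hne⟩; exact ⟨List.mem_cons_of_mem _ hx, hm, hne⟩
      · rintro ⟨hx, hm, hne⟩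
        rcases List.mem_cons.mp hx with rfl | hx
        · rw [hm] at hs; exact absurd rfl hs
        · exact ⟨hx, hm, hne⟩

-- A's marker loop collects exactly the basenames that occur in names
theorem pvMatches_eq (names markers : List String) :
    markers.foldl (fun acc marker =>
      if PySem.Str.isIn "/" marker then
        let basename := PySem.List.pyGetD ((PySem.Str.split? marker "/").getD []) (-1) ""
        if names.contains basename then acc ++ [basename] else acc
      else
        if names.contains marker then acc ++ [marker] else acc) []
    = ((markers.map pvBasename).filter (fun b => names.contains b)) := by
  have hstep : (fun (acc : List String) marker =>
      if PySem.Str.isIn "/" marker then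
        let basename := PySem.List.pyGetD ((PySem.Str.split? marker "/").getD []) (-1) ""
        if names.contains basename then acc ++ [basename] else acc
      else
        if names.contains marker then acc ++ [marker] else acc)
      = (fun acc marker => if names.contains (pvBasename marker) then acc ++ [pvBasename marker] else acc) := by
    funext acc marker
    by_cases h : PySem.Chars.isIn ['/'] marker.toList = true
    · simp [pvBasename, PySem.Str.isIn, h]
    · simp [pvBasename, PySem.Str.isIn, h]
  rw [hstep, PySem.List.foldl_append_if (fun m => names.contains (pvBasename m)) pvBasename markers []]
  simp [List.filter_map, Function.comp_def]

-- ===== VERDICT (by name: the statement is the Claim_ definition above) =====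
theorem build_priority_samples_py_spec : Claim_equal_build_priority_samples_py := by
  intro names markers max_count _
  unfold Spec_build_priority_samples_py build_priority_samples_py build_priority_samples_py_alt
  simp only [pvMatches_eq names markers]
  set memS : String → Bool := fun n => (PySem.Set.ofList (markers.map pvBasename)).contains n with hmemS
  have hmem : ∀ n, memS n = true ↔ n ∈ markers.map pvBasename := by
    intro n
    rw [hmemS]
    exact (PySem.Set.contains_iff _ n).trans (PySem.Set.mem_ofList _ n)
  rw [pvLoop_eq memS (PySem.List.sorted names (fun x => x)) [] []]
  simp only [List.getLast?_nil, List.nil_append]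
  have hsortn : (PySem.List.sorted names (fun x => x)).Pairwise (· ≤ ·) :=
    PySem.List.sorted_pairwise names (fun x => x)
  obtain ⟨hded_lt, hded_mem⟩ := pvDed_spec memS (PySem.List.sorted names (fun x => x)) none hsortn (by simp)
  -- the two head blocks agree
  have hmm : PySem.List.sorted (PySem.Set.ofList ((markers.map pvBasename).filter (fun b => names.contains b))) (fun x => x)
      = pvDed memS none (PySem.List.sorted names (fun x => x)) := by
    apply PySem.List.sorted_eq_of_perm_of_pairwise_lt
    · rw [List.perm_ext_iff_of_nodup
        (List.Pairwise.imp (fun {a b} h => ne_of_lt h) hded_lt) (PySem.Set.nodup_ofList _)]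
      intro x
      rw [hded_mem, PySem.Set.mem_ofList, List.mem_filter, PySem.List.mem_sorted]
      constructor
      · rintro ⟨hx, hm, -⟩
        exact ⟨(hmem x).mp hm, by simpa using hx⟩
      · rintro ⟨hm, hx⟩
        exact ⟨by simpa using hx, (hmem x).mpr hm, by simp⟩
    · exact hded_lt
  -- membership in the sorted marker block is membership in the marker set, for n ∈ names
  have hpt : ∀ n ∈ names,
      ((PySem.List.sorted (PySem.Set.ofList ((markers.map pvBasename).filter (fun b => names.contains b))) (fun x => x)).contains n) = memS n := by
    intro n hn
    rw [Bool.eq_iff_iff]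
    rw [List.contains_iff_mem, PySem.List.mem_sorted, PySem.Set.mem_ofList, List.mem_filter]
    rw [hmem n]
    constructor
    · rintro ⟨hm, -⟩; exact hm
    · intro hm; exact ⟨hm, by simpa using hn⟩
  -- the two tail blocks agree
  have hrest : PySem.List.sorted (names.filter (fun name =>
        !((PySem.List.sorted (PySem.Set.ofList ((markers.map pvBasename).filter (fun b => names.contains b))) (fun x => x)).contains name))) (fun x => x)
      = (PySem.List.sorted names (fun x => x)).filter (fun n => !memS n) := by
    apply PySem.List.sorted_id_eq_of_perm_of_pairwise
    · have hperm := (PySem.List.sorted_perm names (fun x => x) false).filter (fun n => !memS n)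
      have hfc : names.filter (fun name =>
            !((PySem.List.sorted (PySem.Set.ofList ((markers.map pvBasename).filter (fun b => names.contains b))) (fun x => x)).contains name))
          = names.filter (fun n => !memS n) :=
        List.filter_congr (fun n hn => by rw [hpt n hn])
      rw [hfc]
      exact hperm
    · exact hsortn.sublist List.filter_sublist
  rw [hrest, hmm]
  by_cases h0 : max_count = 0
  · subst h0
    rw [if_pos rfl, PySem.List.slice_to _ (le_refl 0)]
    simp
  · rw [if_neg h0]
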